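-- pv_equiv track=rewrite | github.com/MasiarNovine/bioinformatics101_ss2018 | assignment2/ba1m.py | NumToPat
-- ===== SOURCE A (Python) =====
-- def NumToSym(num):
--     NTS = {0:'A', 1:'C', 2:'G', 3:'T'}
--     return NTS[num]
--
-- def NumToPat(index,k):
--     if k == 1:
--         return NumToSym(index)
--     prefIndex = int(index/4)
--     r = index%4
--     sym = NumToSym(r)
--     prefPat = NumToPat(prefIndex,k-1)
--     return prefPat + sym
-- ===== SOURCE B (Python) =====
-- def NumToSym(num):
--     NTS = {0: 'A', 1: 'C', 2: 'G', 3: 'T'}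
--     return NTS[num]
--
-- def NumToPat(index, k):
--     # Iterative: peel off k-1 base-4 digits (low to high), prepending symbols;
--     # the leftover quotient is passed to NumToSym raw, like A's base case.
--     result = ""
--     for _ in range(k - 1):
--         result = NumToSym(index % 4) + result
--         index = int(index / 4)
--     return NumToSym(index) + result
-- ===== Notes on version B (the rewrite author's own statement) =====
-- stated objective: idiomatic
-- what changed: Replaced the k-deep recursion (building the string on the way back up) with a single iterative loop that peels off k-1 base-4 digits and prepends their symbols, applying NumToSym to the raw leftover quotient at the end.
import Mathlib
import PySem

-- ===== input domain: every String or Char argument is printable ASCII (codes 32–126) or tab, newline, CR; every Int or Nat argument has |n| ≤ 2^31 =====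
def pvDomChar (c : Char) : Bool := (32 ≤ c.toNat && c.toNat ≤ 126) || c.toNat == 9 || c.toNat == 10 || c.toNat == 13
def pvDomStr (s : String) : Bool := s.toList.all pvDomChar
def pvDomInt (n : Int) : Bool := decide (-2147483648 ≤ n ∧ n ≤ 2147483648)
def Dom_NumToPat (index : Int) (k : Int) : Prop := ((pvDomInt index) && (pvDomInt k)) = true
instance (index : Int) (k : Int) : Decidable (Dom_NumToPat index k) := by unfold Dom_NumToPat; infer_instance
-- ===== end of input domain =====

-- B replaces A's k-deep recursion by one iterative digit-peeling loop (idiomatic; return value only).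

-- ===== PORT A =====
-- NTS[num]; KeyError (num outside 0..3) is excluded by Pre_, the port returns "" there.
-- (Source A and Source B define the textually identical NumToSym helper; both ports share this one port of it)
def NumToSym (num : Int) : String :=
  ((PySem.Dict.ofList [((0:Int), "A"), (1, "C"), (2, "G"), (3, "T")]).get? num).getD ""

-- the recursion of A, on fuel n = k-1 (Python's int(index/4) is truncation toward zero = Int.tdiv on the domain |index| ≤ 2^31)
def NumToPatAuxA (index : Int) : Nat → String
  | 0 => NumToSym index
  | n + 1 => NumToPatAuxA (index.tdiv 4) n ++ NumToSym (PySem.Int.mod index 4)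

def NumToPat (index : Int) (k : Int) : String := NumToPatAuxA index (k - 1).toNat

-- ===== PORT B =====
-- loop k-1 times over state (index, result); finally NumToSym(index) ++ result
def NumToPat_alt (index : Int) (k : Int) : String :=
  let s := (List.range (k - 1).toNat).foldl
    (fun (s : Int × String) _ => (s.1.tdiv 4, NumToSym (PySem.Int.mod s.1 4) ++ s.2))
    (index, "")
  NumToSym s.1 ++ s.2

-- ===== PRECONDITION & SPEC =====
-- Pre_ is exactly where the Python A returns normally: k ≥ 1 (else infinite recursion) and the
-- leftover quotient after k-1 truncating divisions by 4 lies in 0..3 (else NumToSym raises KeyError).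
def Pre_NumToPat (index : Int) (k : Int) : Prop :=
  1 ≤ k ∧ -((4:Int) ^ (k - 1).toNat) < index ∧ index < (4:Int) ^ k.toNat
instance (index : Int) (k : Int) : Decidable (Pre_NumToPat index k) := by unfold Pre_NumToPat; infer_instance
def pvWitness_NumToPat : Int × Int := (11, 3)

def Spec_NumToPat (index : Int) (k : Int) (out : String) : Prop := out = NumToPat_alt index k
instance (index : Int) (k : Int) (out : String) : Decidable (Spec_NumToPat index k out) := by unfold Spec_NumToPat; infer_instance

-- ===== CLAIM (what is proved, stated in full; the proofs are below) =====
def Claim_equal_NumToPat : Prop := ∀ (index : Int) (k : Int), Dom_NumToPat index k → Pre_NumToPat index k → Spec_NumToPat index k (NumToPat index k)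

-- ===== LEMMAS AND PROOFS =====

-- the loop, run over any list of n ignored elements, computes A's recursion with res appended
theorem foldl_eq_aux (l : List Nat) : ∀ (index : Int) (res : String),
    (NumToSym ((l.foldl
        (fun (s : Int × String) _ => (s.1.tdiv 4, NumToSym (PySem.Int.mod s.1 4) ++ s.2))
        (index, res)).1) ++
      (l.foldl
        (fun (s : Int × String) _ => (s.1.tdiv 4, NumToSym (PySem.Int.mod s.1 4) ++ s.2))
        (index, res)).2)
      = NumToPatAuxA index l.length ++ res := by
  induction l with
  | nil => intro index res; simp [NumToPatAuxA]
  | cons a t ih =>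
      intro index res
      simp only [List.foldl_cons, List.length_cons]
      rw [ih]
      simp [NumToPatAuxA, String.append_assoc]

-- ===== VERDICT (by name: the statement is the Claim_ definition above) =====
theorem NumToPat_spec : Claim_equal_NumToPat := by
  intro index k _ _
  have h := foldl_eq_aux (List.range (k - 1).toNat) index ""
  rw [List.length_range] at h
  simp only [Spec_NumToPat, NumToPat, NumToPat_alt]
  rw [h]
  exact String.append_empty.symm
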